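-- pv_equiv track=rewrite | github.com/Quyenne07/HoangTrongQuyen_N21DCDT078_buoitapcuoiky | HoangTrongQuyen_N21DCDT078_baitapcuoiky/Mang_Trung_Hang.py | Trung_Hang
-- ===== SOURCE A (Python) =====
-- def Trung_Hang(mang):
--     n = len(mang)
--
--     # Kiểm tra xem mang có phải là ma trận vuông không
--     for hang in mang:
--         if len(hang) != n:
--             return False
--
--     # Duyệt qua các cặp hàng
--     for i in range(n):
--         for j in range(i+1, n):
--             if mang[i] == mang[j]:
--                 return True
--
--     return False
-- ===== SOURCE B (Python) =====
-- def Trung_Hang(mang):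
--     n = len(mang)
--     for hang in mang:
--         if len(hang) != n:
--             return False
--     rows = sorted(mang)
--     for i in range(n - 1):
--         if rows[i] == rows[i + 1]:
--             return True
--     return False
-- ===== Notes on version B (the rewrite author's own statement) =====
-- stated objective: faster
-- what changed: Replaces the all-pairs row comparison with sorting the rows and a single adjacent-pair scan.
import Mathlib
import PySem

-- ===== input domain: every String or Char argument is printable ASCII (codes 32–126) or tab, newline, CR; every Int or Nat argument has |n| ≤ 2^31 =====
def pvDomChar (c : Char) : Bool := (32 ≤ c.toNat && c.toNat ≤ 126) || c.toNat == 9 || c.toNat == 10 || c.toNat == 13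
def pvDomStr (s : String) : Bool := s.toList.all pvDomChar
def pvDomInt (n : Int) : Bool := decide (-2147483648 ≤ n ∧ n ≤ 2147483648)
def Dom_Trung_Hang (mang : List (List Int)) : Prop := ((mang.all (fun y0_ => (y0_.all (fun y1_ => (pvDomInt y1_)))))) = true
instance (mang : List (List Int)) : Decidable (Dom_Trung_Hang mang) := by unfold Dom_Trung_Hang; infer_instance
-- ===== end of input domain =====

-- B replaces A's all-pairs row comparison with sorting the rows and one adjacent-pair scan (faster algorithm).


-- ===== PORT A =====
-- literal port: validate the matrix is square (early return False), then scan all pairs i < j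
def Trung_Hang (mang : List (List Int)) : Bool :=
  let n : Int := mang.length
  if mang.all (fun hang => decide ((hang.length : Int) = n)) then
    (PySem.List.pyRange 0 n 1).any (fun i =>
      (PySem.List.pyRange (i + 1) n 1).any (fun j =>
        decide (PySem.List.pyGet? mang i = PySem.List.pyGet? mang j)))
  else false

-- ===== PORT B =====
-- literal port of Source B: same validation, then rows = sorted(mang) and one adjacent-pair pass
def Trung_Hang_alt (mang : List (List Int)) : Bool :=
  let n : Int := mang.length
  if mang.all (fun hang => decide ((hang.length : Int) = n)) then
    let rows := @PySem.List.sorted (List Int) (List Int) List.instLinearOrder.toLT LinearOrder.toDecidableLT mang (fun x => x) false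
    (PySem.List.pyRange 0 (n - 1) 1).any (fun i =>
      decide (PySem.List.pyGet? rows i = PySem.List.pyGet? rows (i + 1)))
  else false

-- ===== PRECONDITION & SPEC =====
def Spec_Trung_Hang (mang : List (List Int)) (out : Bool) : Prop := out = Trung_Hang_alt mang
instance (mang : List (List Int)) (out : Bool) : Decidable (Spec_Trung_Hang mang out) := by unfold Spec_Trung_Hang; infer_instance

-- ===== CLAIM (what is proved, stated in full; the proofs are below) =====
def Claim_equal_Trung_Hang : Prop := ∀ (mang : List (List Int)), Dom_Trung_Hang mang → Spec_Trung_Hang mang (Trung_Hang mang)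

-- ===== LEMMAS AND PROOFS =====

-- A's pair scan finds a duplicate row iff the list is not Nodup
theorem pairsAny_eq_not_nodup (l : List (List Int)) :
    ((PySem.List.pyRange 0 (l.length : Int) 1).any (fun i =>
      (PySem.List.pyRange (i + 1) (l.length : Int) 1).any (fun j =>
        decide (PySem.List.pyGet? l i = PySem.List.pyGet? l j)))) = !decide l.Nodup := by
  rw [Bool.eq_iff_iff]
  simp only [List.any_eq_true, PySem.List.mem_pyRange_one, Bool.not_eq_eq_eq_not,
    Bool.not_true, decide_eq_true_eq, decide_eq_false_iff_not]
  constructor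
  · rintro ⟨i, ⟨hi0, hin⟩, j, ⟨hij, hjn⟩, heq⟩ hnd
    rw [List.nodup_iff_getElem?_ne_getElem?] at hnd
    have h0j : (0:Int) ≤ j := by omega
    rw [PySem.List.pyGet?_eq_some_getElem l hi0 (by omega),
        PySem.List.pyGet?_eq_some_getElem l h0j (by omega)] at heq
    exact hnd i.toNat j.toNat (by omega) (by omega)
      (by simp only [List.getElem?_eq_getElem (by omega : i.toNat < l.length),
            List.getElem?_eq_getElem (by omega : j.toNat < l.length)]
          exact congrArg some (Option.some.inj heq))
  · intro hnd
    rw [List.nodup_iff_getElem?_ne_getElem?] at hnd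
    push Not at hnd
    obtain ⟨i, j, hij, hjn, heq⟩ := hnd
    refine ⟨(i : Int), ⟨by omega, by omega⟩, (j : Int), ⟨by omega, by omega⟩, ?_⟩
    rw [PySem.List.pyGet?_eq_some_getElem l (by omega) (by exact_mod_cast by omega),
        PySem.List.pyGet?_eq_some_getElem l (by omega) (by exact_mod_cast by omega)]
    simp only [Int.toNat_natCast]
    rw [List.getElem?_eq_getElem (by omega : i < l.length),
        List.getElem?_eq_getElem hjn] at heq
    exact congrArg some (Option.some.inj heq)

-- On a (≤)-sorted list, the adjacent scan finds an equal pair iff the list is not Nodup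
theorem adjAny_eq_not_nodup (l : List (List Int)) (hp : l.Pairwise (· ≤ ·)) :
    ((PySem.List.pyRange 0 ((l.length : Int) - 1) 1).any (fun i =>
      decide (PySem.List.pyGet? l i = PySem.List.pyGet? l (i + 1)))) = !decide l.Nodup := by
  rw [Bool.eq_iff_iff]
  simp only [List.any_eq_true, PySem.List.mem_pyRange_one, Bool.not_eq_eq_eq_not,
    Bool.not_true, decide_eq_true_eq, decide_eq_false_iff_not]
  constructor
  · rintro ⟨i, ⟨hi0, hin⟩, heq⟩ hnd
    have h1 : i.toNat + 1 < l.length := by omega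
    rw [PySem.List.pyGet?_eq_some_getElem l hi0 (by omega),
        PySem.List.pyGet?_eq_some_getElem l (by omega) (by omega)] at heq
    have : i.toNat < (i + 1).toNat := by omega
    have heq' : l[i.toNat] = l[(i+1).toNat] := Option.some.inj heq
    rw [List.nodup_iff_getElem?_ne_getElem?] at hnd
    exact hnd i.toNat (i+1).toNat (by omega) (by omega)
      (by rw [List.getElem?_eq_getElem (by omega), List.getElem?_eq_getElem (by omega)]
          exact congrArg some heq')
  · intro hnd
    by_contra hno
    push Not at hno
    apply hnd
    -- no adjacent pair is equal, so adjacent pairs are strictly increasing, so Nodup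
    have hchain : List.IsChain (fun a b : List Int => a < b) l := by
      rw [List.isChain_iff_getElem]
      intro i hi
      have hle : l[i] ≤ l[i+1] := by
        have := List.pairwise_iff_getElem.mp hp i (i+1) (by omega) hi (by omega)
        exact this
      have hne : l[i] ≠ l[i+1] := by
        intro h
        apply hno (i : Int) ⟨by omega, by omega⟩
        rw [PySem.List.pyGet?_eq_some_getElem l (by omega) (by omega),
            PySem.List.pyGet?_eq_some_getElem l (by omega) (by omega)]
        simp only [Int.toNat_natCast]
        have ht : ((i : Int) + 1).toNat = i + 1 := by omega
        exact congrArg some (by simp only [ht]; exact h)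
      exact lt_of_le_of_ne hle hne
    have hplt : l.Pairwise (fun a b : List Int => a < b) :=
      List.isChain_iff_pairwise.mp hchain
    exact (hplt.imp fun h => ne_of_lt h)

-- ===== VERDICT (by name: the statement is the Claim_ definition above) =====
theorem Trung_Hang_spec : Claim_equal_Trung_Hang := by
  intro mang _
  unfold Spec_Trung_Hang Trung_Hang Trung_Hang_alt
  simp only []
  by_cases hsq : mang.all (fun hang => decide ((hang.length : Int) = (mang.length : Int))) = true
  · rw [if_pos hsq, if_pos hsq]
    have hperm := @PySem.List.sorted_perm (List Int) (List Int) List.instLinearOrder.toLT LinearOrder.toDecidableLT mang (fun x => x) false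
    have hlen : (@PySem.List.sorted (List Int) (List Int) List.instLinearOrder.toLT LinearOrder.toDecidableLT mang (fun x => x) false).length = mang.length :=
      hperm.length_eq
    have hp : (@PySem.List.sorted (List Int) (List Int) List.instLinearOrder.toLT LinearOrder.toDecidableLT mang (fun x => x) false).Pairwise (· ≤ ·) :=
      PySem.List.sorted_pairwise (κ := List Int) mang (fun x => x)
    have hB := adjAny_eq_not_nodup (@PySem.List.sorted (List Int) (List Int) List.instLinearOrder.toLT LinearOrder.toDecidableLT mang (fun x => x) false) hp
    rw [hlen] at hB
    rw [pairsAny_eq_not_nodup mang, hB]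
    congr 1
    simp [hperm.nodup_iff]
  · rw [if_neg hsq, if_neg hsq]
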